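-- pv_equiv track=rewrite | github.com/Yoo-Ju/Revisit | MSRA_proposal_wifi_log/code/code/sequencefeaturegenerator.py | relatedfeatures
-- ===== SOURCE A (Python) =====
-- def is_subseq(x, y):
--     it = iter(y)
--     return all(c in it for c in x)
--
-- def relatedfeatures(traj, seqE):
--     sss = 2001
--     ddd = []
--     for seq in seqE:
--         if is_subseq(seq, traj) == True:
--             ddd.append(sss)
--         sss += 1
--     return ddd
-- ===== SOURCE B (Python) =====
-- def relatedfeatures(traj, seqE):
--     # Single streaming pass over traj; a dict maps each value to the (indices of)
--     # queries whose next needed element is that value, so each traj element only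
--     # touches the queries it can advance.
--     waiting = {}
--     ptrs = [0] * len(seqE)
--     for j in range(len(seqE)):
--         if seqE[j]:
--             waiting.setdefault(seqE[j][0], []).append(j)
--     for t in traj:
--         js = waiting.pop(t, None)
--         if js is not None:
--             for j in js:
--                 ptrs[j] += 1
--                 seq = seqE[j]
--                 if ptrs[j] < len(seq):
--                     waiting.setdefault(seq[ptrs[j]], []).append(j)
--     return [2001 + j for j in range(len(seqE)) if ptrs[j] == len(seqE[j])]
-- ===== Notes on version B (the rewrite author's own statement) =====
-- stated objective: faster
-- what changed: Instead of re-scanning traj once per query sequence with a consumed iterator, B makes a single streaming pass over traj keeping a dict from value to the queries waiting for that value, so each traj element only touches the queries it can advance.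
import Mathlib
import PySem

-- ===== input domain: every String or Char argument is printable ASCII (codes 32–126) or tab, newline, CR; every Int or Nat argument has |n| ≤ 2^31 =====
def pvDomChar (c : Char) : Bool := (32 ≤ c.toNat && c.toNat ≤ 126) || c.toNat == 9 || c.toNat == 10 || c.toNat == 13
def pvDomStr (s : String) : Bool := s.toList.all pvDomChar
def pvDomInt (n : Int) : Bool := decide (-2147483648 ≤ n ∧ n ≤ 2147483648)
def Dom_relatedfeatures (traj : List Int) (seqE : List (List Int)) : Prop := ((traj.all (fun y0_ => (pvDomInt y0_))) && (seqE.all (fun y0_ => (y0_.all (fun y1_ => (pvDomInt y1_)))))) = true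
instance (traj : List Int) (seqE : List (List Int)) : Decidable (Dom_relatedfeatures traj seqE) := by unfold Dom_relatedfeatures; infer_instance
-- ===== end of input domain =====

-- B replaces A's per-query re-scan of traj (one consumed iterator per sequence) by a single
-- streaming pass over traj with a dict from value to the queries waiting for that value,
-- so each traj element only touches the queries it can advance.

-- ===== PORT A =====
-- 'c in it' on an iterator: scan forward until c is found, return the rest; none = exhausted
def pvConsume (c : Int) : List Int → Option (List Int)
  | [] => none
  | a :: as => if a = c then some as else pvConsume c as

-- is_subseq(x, y): all(c in it for c in x) over it = iter(y)
def pvIsSubseq : List Int → List Int → Bool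
  | [], _ => true
  | c :: cs, it =>
    match pvConsume c it with
    | none => false
    | some it' => pvIsSubseq cs it'

def relatedfeatures (traj : List Int) (seqE : List (List Int)) : List Int :=
  (seqE.foldl
    (fun (p : Int × List Int) seq =>
      (p.1 + 1, if pvIsSubseq seq traj = true then p.2 ++ [p.1] else p.2))
    (2001, [])).2

-- ===== PORT B =====
-- waiting.setdefault(c, []).append(j)  ≡  waiting[c] = waiting.get(c, []) + [j]
def pvReg (w : PySem.Dict Int (List Nat)) (c : Int) (j : Nat) : PySem.Dict Int (List Nat) :=
  w.modify c [] (· ++ [j])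

-- body of 'for j in js': ptrs[j] += 1 (the new value is st.2.getD j 0 + 1);
-- then re-register j under its next needed value seq[ptrs[j]], if any
def pvInner (seqE : List (List Int)) (st : PySem.Dict Int (List Nat) × List Nat) (j : Nat) :
    PySem.Dict Int (List Nat) × List Nat :=
  if st.2.getD j 0 + 1 < (seqE.getD j []).length then
    (pvReg st.1 ((seqE.getD j []).getD (st.2.getD j 0 + 1) 0) j, st.2.set j (st.2.getD j 0 + 1))
  else (st.1, st.2.set j (st.2.getD j 0 + 1))

-- body of 'for t in traj': js = waiting.pop(t, None); if js is not None: …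
def pvOuter (seqE : List (List Int)) (st : PySem.Dict Int (List Nat) × List Nat) (t : Int) :
    PySem.Dict Int (List Nat) × List Nat :=
  match st.1.get? t with
  | none => st
  | some js => js.foldl (pvInner seqE) (st.1.erase t, st.2)

def relatedfeatures_alt (traj : List Int) (seqE : List (List Int)) : List Int :=
  let w0 : PySem.Dict Int (List Nat) :=
    (List.range seqE.length).foldl
      (fun w j =>
        match seqE.getD j [] with
        | [] => w
        | c :: _ => pvReg w c j)
      PySem.Dict.empty
  let fin := traj.foldl (pvOuter seqE) (w0, List.replicate seqE.length 0)
  ((List.range seqE.length).filter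
      (fun j => fin.2.getD j 0 == (seqE.getD j []).length)).map (fun (j : Nat) => 2001 + (j : Int))

-- ===== PRECONDITION & SPEC =====
def Spec_relatedfeatures (traj : List Int) (seqE : List (List Int)) (out : List Int) : Prop := out = relatedfeatures_alt traj seqE
instance (traj : List Int) (seqE : List (List Int)) (out : List Int) : Decidable (Spec_relatedfeatures traj seqE out) := by unfold Spec_relatedfeatures; infer_instance

-- ===== CLAIM (what is proved, stated in full; the proofs are below) =====
def Claim_equal_relatedfeatures : Prop := ∀ (traj : List Int) (seqE : List (List Int)), Dom_relatedfeatures traj seqE → Spec_relatedfeatures traj seqE (relatedfeatures traj seqE)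

-- ===== LEMMAS AND PROOFS =====

-- one streaming step on a single query's remaining suffix
def pvStep (t : Int) (rem : List Int) : List Int :=
  match rem with
  | [] => []
  | c :: cs => if c = t then cs else c :: cs

-- the ids produced for one block of sequences, starting at counter sss
def pvIds (traj : List Int) : Int → List (List Int) → List Int
  | _, [] => []
  | sss, seq :: rest => (if pvIsSubseq seq traj then [sss] else []) ++ pvIds traj (sss + 1) rest

-- remaining suffix of query j, given the pointer list
def pvRem (seqE : List (List Int)) (ptrs : List Nat) (j : Nat) : List Int :=
  (seqE.getD j []).drop (ptrs.getD j 0)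

-- invariant of B's streaming state
def pvInv (seqE : List (List Int)) (st : PySem.Dict Int (List Nat) × List Nat) : Prop :=
  st.2.length = seqE.length ∧
  (∀ j, st.2.getD j 0 ≤ (seqE.getD j []).length) ∧
  (∀ v, (st.1.getD v []).Nodup) ∧
  (∀ v j, j ∈ st.1.getD v [] ↔ (pvRem seqE st.2 j).head? = some v)

-- invariant inside the inner loop, todo = queries of t's bucket still to process
def pvMid (seqE : List (List Int)) (t : Int) (orig : List Nat) (todo : List Nat)
    (st : PySem.Dict Int (List Nat) × List Nat) : Prop :=
  st.2.length = seqE.length ∧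
  (∀ j, st.2.getD j 0 =
    if j ∉ todo ∧ (pvRem seqE orig j).head? = some t then orig.getD j 0 + 1 else orig.getD j 0) ∧
  (∀ v, (st.1.getD v []).Nodup) ∧
  (∀ v j, j ∈ st.1.getD v [] ↔
    ((j ∉ todo ∧ (pvRem seqE orig j).head? = some t ∧
        ((seqE.getD j []).drop (orig.getD j 0 + 1)).head? = some v)
     ∨ ((pvRem seqE orig j).head? = some v ∧ v ≠ t)))

theorem pv_find_filter (k k' : Int) : ∀ (items : List (Int × List Nat)),
    List.find? (fun p => p.1 == k') (items.filter (fun p => !(p.1 == k)))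
      = if k' = k then none else List.find? (fun p => p.1 == k') items := by
  intro items
  induction items with
  | nil => split_ifs <;> simp
  | cons p rest ih =>
    by_cases h1 : p.1 = k
    · rw [List.filter_cons_of_neg (by simp [h1]), ih]
      split_ifs with h2
      · rfl
      · have hne : ¬ p.1 = k' := by rw [h1]; exact fun hh => h2 hh.symm
        rw [List.find?_cons_of_neg (by simp [hne])]
    · rw [List.filter_cons_of_pos (by simp [h1])]
      by_cases h2 : p.1 = k'
      · have hkk : ¬ k' = k := fun hh => h1 (h2.trans hh)
        rw [if_neg hkk, List.find?_cons_of_pos (by simp [h2]), List.find?_cons_of_pos (by simp [h2])]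
      · rw [List.find?_cons_of_neg (by simp [h2]), List.find?_cons_of_neg (by simp [h2]), ih]

theorem pv_getD_erase (d : PySem.Dict Int (List Nat)) (k k' : Int) :
    (d.erase k).getD k' [] = if k' = k then [] else d.getD k' [] := by
  rcases d with ⟨items⟩
  simp only [PySem.Dict.erase, PySem.Dict.getD, PySem.Dict.get?]
  rw [pv_find_filter]
  split_ifs <;> simp

theorem pv_getD_some (d : PySem.Dict Int (List Nat)) (k : Int) (js : List Nat)
    (h : d.get? k = some js) : d.getD k [] = js := by
  simp [PySem.Dict.getD, h]

theorem pv_getD_of_none (d : PySem.Dict Int (List Nat)) (k : Int)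
    (h : d.get? k = none) : d.getD k [] = [] := by
  simp [PySem.Dict.getD, h]

theorem pv_lt_of_getD_ne (seqE : List (List Int)) (j : Nat)
    (h : seqE.getD j [] ≠ []) : j < seqE.length := by
  by_contra hj
  exact h (List.getD_eq_default _ _ (Nat.le_of_not_lt hj))

theorem pv_getD_set_self (l : List Nat) (j v : Nat) (h : j < l.length) :
    (l.set j v).getD j 0 = v := by
  simp [List.getD, h]

theorem pv_getD_set_ne (l : List Nat) (j i v : Nat) (h : i ≠ j) :
    (l.set j v).getD i 0 = l.getD i 0 := by
  have hne : j ≠ i := fun hh => h hh.symm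
  simp [List.getD, hne]

-- streaming a single suffix through traj empties it iff A's iterator check succeeds
theorem pv_stream_eq_subseq : ∀ (traj x : List Int),
    (traj.foldl (fun r t => pvStep t r) x).isEmpty = pvIsSubseq x traj := by
  intro traj
  induction traj with
  | nil =>
    intro x
    cases x <;> simp [pvIsSubseq, pvConsume, List.isEmpty]
  | cons t ts ih =>
    intro x
    rw [List.foldl_cons, ih (pvStep t x)]
    cases x with
    | nil => simp [pvStep, pvIsSubseq]
    | cons c cs =>
      by_cases h : c = t
      · simp [pvStep, pvIsSubseq, pvConsume, h]
      · have h' : ¬ t = c := fun hh => h hh.symm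
        simp [pvStep, pvIsSubseq, pvConsume, h, h']

-- A's fold with counter, characterised
theorem pv_A_fold (traj : List Int) : ∀ (l : List (List Int)) (sss : Int) (acc : List Int),
    (l.foldl
      (fun (p : Int × List Int) seq =>
        (p.1 + 1, if pvIsSubseq seq traj = true then p.2 ++ [p.1] else p.2))
      (sss, acc)).2 = acc ++ pvIds traj sss l := by
  intro l
  induction l with
  | nil => intro sss acc; simp [pvIds]
  | cons seq rest ih =>
    intro sss acc
    simp only [List.foldl_cons, pvIds]
    by_cases h : pvIsSubseq seq traj = true
    · simp [h, ih, List.append_assoc]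
    · simp [h, ih]

-- shifting the index range by one
theorem pv_shift (sss : Int) (q q' : Nat → Bool) (hq : ∀ j, q (Nat.succ j) = q' j) :
    ∀ (r : List Nat),
    List.map (fun (j : Nat) => sss + (j : Int)) (List.filter q (List.map Nat.succ r))
      = List.map (fun (j : Nat) => (sss + 1) + (j : Int)) (List.filter q' r) := by
  intro r
  induction r with
  | nil => simp
  | cons a r ih =>
    simp only [List.map_cons, List.filter_cons, hq]
    by_cases h : q' a = true
    · rw [if_pos h, if_pos h, List.map_cons, List.map_cons, ih]
      congr 1
      push_cast
      ring
    · rw [if_neg h, if_neg h, ih]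

-- pvIds as a filter over indices
theorem pv_ids_range (traj : List Int) : ∀ (l : List (List Int)) (sss : Int),
    pvIds traj sss l
      = ((List.range l.length).filter (fun j => pvIsSubseq (l.getD j []) traj)).map
          (fun (j : Nat) => sss + (j : Int)) := by
  intro l
  induction l with
  | nil => intro sss; simp [pvIds]
  | cons x xs ih =>
    intro sss
    rw [pvIds, ih (sss + 1), List.length_cons, List.range_succ_eq_map, List.filter_cons,
      List.getD_cons_zero]
    have hsh := pv_shift sss (fun j => pvIsSubseq ((x :: xs).getD j []) traj)
      (fun j => pvIsSubseq (xs.getD j []) traj) (fun j => by simp)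
      (List.range xs.length)
    by_cases h : pvIsSubseq x traj = true
    · rw [if_pos h, if_pos h, List.map_cons, hsh]
      simp
    · rw [if_neg h, if_neg h, hsh]
      simp

-- bucket update of a registration
theorem pv_getD_reg (w : PySem.Dict Int (List Nat)) (c : Int) (j : Nat) (v : Int) :
    (pvReg w c j).getD v [] = if v = c then w.getD c [] ++ [j] else w.getD v [] := by
  rw [pvReg, PySem.Dict.getD_modify]

theorem pv_lt_of_drop_head {l : List Int} {p : Nat} {c : Int}
    (h : (l.drop p).head? = some c) : p < l.length := by
  by_contra hp
  rw [List.drop_eq_nil_of_le (Nat.le_of_not_lt hp)] at h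
  simp at h

-- the inner loop processes its todo list, maintaining pvMid
theorem pv_inner_fold (seqE : List (List Int)) (t : Int) (orig : List Nat) :
    ∀ (todo : List Nat) (st : PySem.Dict Int (List Nat) × List Nat),
      todo.Nodup → (∀ j ∈ todo, (pvRem seqE orig j).head? = some t) →
      pvMid seqE t orig todo st →
      pvMid seqE t orig [] (todo.foldl (pvInner seqE) st) := by
  intro todo
  induction todo with
  | nil => intro st _ _ hm; exact hm
  | cons j0 rest ih =>
    intro st hnd hhead hmid
    obtain ⟨hlen2, hptr, hndw, hchar⟩ := hmid
    rw [List.foldl_cons]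
    have hj0head : (pvRem seqE orig j0).head? = some t := hhead j0 List.mem_cons_self
    have hj0lt : orig.getD j0 0 < (seqE.getD j0 []).length := pv_lt_of_drop_head hj0head
    have hj0len : j0 < seqE.length := by
      apply pv_lt_of_getD_ne seqE j0
      intro hnil
      unfold pvRem at hj0head
      rw [hnil] at hj0head
      simp at hj0head
    have hj0nin : j0 ∉ rest := (List.nodup_cons.mp hnd).1
    have hrestnd : rest.Nodup := (List.nodup_cons.mp hnd).2
    have hst2j0 : st.2.getD j0 0 = orig.getD j0 0 := by
      have hh := hptr j0
      rw [if_neg] at hh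
      · exact hh
      · rintro ⟨hnin, _⟩
        exact hnin List.mem_cons_self
    have hj0lt2 : j0 < st.2.length := by rw [hlen2]; exact hj0len
    have hptrs_eq : (pvInner seqE st j0).2 = st.2.set j0 (st.2.getD j0 0 + 1) := by
      unfold pvInner
      split_ifs <;> rfl
    have hw_eq : (pvInner seqE st j0).1
        = if st.2.getD j0 0 + 1 < (seqE.getD j0 []).length then
            pvReg st.1 ((seqE.getD j0 []).getD (st.2.getD j0 0 + 1) 0) j0
          else st.1 := by
      unfold pvInner
      split_ifs <;> rfl
    have hninofne : ∀ j, j ≠ j0 → j ∉ rest → j ∉ j0 :: rest := by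
      intro j hjj hnr hm
      rcases List.mem_cons.mp hm with h | h
      · exact hjj h
      · exact hnr h
    apply ih _ hrestnd (fun j hj => hhead j (List.mem_cons_of_mem _ hj))
    refine ⟨?_, ?_, ?_, ?_⟩
    · rw [hptrs_eq, List.length_set]
      exact hlen2
    · intro j
      rw [hptrs_eq]
      by_cases hjj : j = j0
      · subst hjj
        rw [pv_getD_set_self _ _ _ hj0lt2, hst2j0, if_pos ⟨hj0nin, hj0head⟩]
      · rw [pv_getD_set_ne _ _ _ _ hjj, hptr j]
        have hiff : (j ∉ j0 :: rest ∧ (pvRem seqE orig j).head? = some t)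
            ↔ (j ∉ rest ∧ (pvRem seqE orig j).head? = some t) := by
          simp [List.mem_cons, hjj]
        rw [if_congr hiff rfl rfl]
    · intro v
      rw [hw_eq]
      split_ifs with hp2
      · rw [pv_getD_reg]
        split_ifs with hv
        · have hj0nb : j0 ∉ st.1.getD ((seqE.getD j0 []).getD (st.2.getD j0 0 + 1) 0) [] := by
            intro hmem
            rcases (hchar _ j0).mp hmem with ⟨hnin, _, _⟩ | ⟨hh1, hne⟩
            · exact hnin List.mem_cons_self
            · rw [hj0head] at hh1
              exact hne (Option.some.inj hh1).symm
          simp [List.nodup_append, hndw _]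
          exact fun a ha hak => hj0nb (hak ▸ ha)
        · exact hndw v
      · exact hndw v
    · intro v j
      have hc_head : ∀ (hp2 : st.2.getD j0 0 + 1 < (seqE.getD j0 []).length),
          ((seqE.getD j0 []).drop (orig.getD j0 0 + 1)).head?
            = some ((seqE.getD j0 []).getD (st.2.getD j0 0 + 1) 0) := by
        intro hp2
        rw [← hst2j0, List.head?_drop, List.getElem?_eq_getElem hp2,
          List.getD_eq_getElem _ _ hp2]
      rw [hw_eq]
      split_ifs with hp2
      · rw [pv_getD_reg]
        split_ifs with hv
        · subst hv
          rw [List.mem_append]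
          constructor
          · rintro (hmem | hj)
            · rcases (hchar _ j).mp hmem with ⟨hnin, hh1, hh2⟩ | hside
              · exact Or.inl ⟨fun hr => hnin (List.mem_cons_of_mem _ hr), hh1, hh2⟩
              · exact Or.inr hside
            · simp at hj
              subst hj
              exact Or.inl ⟨hj0nin, hj0head, hc_head hp2⟩
          · rintro (⟨hnr, hh1, hh2⟩ | hside)
            · by_cases hjj : j = j0
              · subst hjj
                right
                simp
              · left
                exact (hchar _ j).mpr (Or.inl ⟨hninofne j hjj hnr, hh1, hh2⟩)
            · left
              exact (hchar _ j).mpr (Or.inr hside)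
        · rw [hchar v j]
          constructor
          · rintro (⟨hnin, hh1, hh2⟩ | hside)
            · exact Or.inl ⟨fun hr => hnin (List.mem_cons_of_mem _ hr), hh1, hh2⟩
            · exact Or.inr hside
          · rintro (⟨hnr, hh1, hh2⟩ | hside)
            · by_cases hjj : j = j0
              · subst hjj
                rw [hc_head hp2] at hh2
                exact absurd (Option.some.inj hh2).symm hv
              · exact Or.inl ⟨hninofne j hjj hnr, hh1, hh2⟩
            · exact Or.inr hside
      · rw [hchar v j]
        have hnone : (seqE.getD j0 []).drop (orig.getD j0 0 + 1) = [] := by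
          apply List.drop_eq_nil_of_le
          rw [← hst2j0]
          omega
        constructor
        · rintro (⟨hnin, hh1, hh2⟩ | hside)
          · exact Or.inl ⟨fun hr => hnin (List.mem_cons_of_mem _ hr), hh1, hh2⟩
          · exact Or.inr hside
        · rintro (⟨hnr, hh1, hh2⟩ | hside)
          · by_cases hjj : j = j0
            · subst hjj
              rw [hnone] at hh2
              simp at hh2
            · exact Or.inl ⟨hninofne j hjj hnr, hh1, hh2⟩
          · exact Or.inr hside

-- one outer step preserves the invariant and advances exactly the waiting queries
theorem pv_outer_step (seqE : List (List Int)) (st : PySem.Dict Int (List Nat) × List Nat)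
    (t : Int) (h : pvInv seqE st) :
    pvInv seqE (pvOuter seqE st t) ∧
    ∀ j, (pvOuter seqE st t).2.getD j 0 =
      if (pvRem seqE st.2 j).head? = some t then st.2.getD j 0 + 1 else st.2.getD j 0 := by
  obtain ⟨hlen, hbnd, hnd, hchar⟩ := h
  cases hget : st.1.get? t with
  | none =>
    have hempty : st.1.getD t [] = [] := pv_getD_of_none _ _ hget
    have hnot : ∀ j, ¬ (pvRem seqE st.2 j).head? = some t := by
      intro j hj
      have hmem := (hchar t j).mpr hj
      rw [hempty] at hmem
      simp at hmem
    constructor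
    · simp only [pvOuter, hget]
      exact ⟨hlen, hbnd, hnd, hchar⟩
    · intro j
      simp only [pvOuter, hget]
      rw [if_neg (hnot j)]
  | some js =>
    have hjs : st.1.getD t [] = js := pv_getD_some _ _ _ hget
    have hmemjs : ∀ j, j ∈ js ↔ (pvRem seqE st.2 j).head? = some t := by
      intro j
      rw [← hjs]
      exact hchar t j
    have hmid0 : pvMid seqE t st.2 js (st.1.erase t, st.2) := by
      refine ⟨hlen, ?_, ?_, ?_⟩
      · intro j
        rw [if_neg]
        rintro ⟨hnotin, hhead⟩
        exact hnotin ((hmemjs j).mpr hhead)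
      · intro v
        show ((st.1.erase t).getD v []).Nodup
        rw [pv_getD_erase]
        split_ifs
        · exact List.nodup_nil
        · exact hnd v
      · intro v j
        show j ∈ (st.1.erase t).getD v [] ↔ _
        rw [pv_getD_erase]
        split_ifs with hv
        · subst hv
          simp only [List.not_mem_nil, false_iff]
          rintro (⟨hnotin, hhead, _⟩ | ⟨hhead, hne⟩)
          · exact hnotin ((hmemjs j).mpr hhead)
          · exact hne rfl
        · rw [hchar v j]
          constructor
          · intro hh
            exact Or.inr ⟨hh, hv⟩
          · rintro (⟨hnotin, hhead, _⟩ | ⟨hh, _⟩)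
            · exact absurd ((hmemjs j).mpr hhead) hnotin
            · exact hh
    obtain ⟨hlen', hptr, hnd', hchar'⟩ :=
      pv_inner_fold seqE t st.2 js (st.1.erase t, st.2)
        (hjs ▸ hnd t) (fun j hj => (hmemjs j).mp hj) hmid0
    have houter : pvOuter seqE st t = js.foldl (pvInner seqE) (st.1.erase t, st.2) := by
      simp only [pvOuter, hget]
    have hptr' : ∀ j, (pvOuter seqE st t).2.getD j 0 =
        if (pvRem seqE st.2 j).head? = some t then st.2.getD j 0 + 1 else st.2.getD j 0 := by
      intro j
      rw [houter]
      simpa using hptr j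
    refine ⟨⟨by rw [houter]; exact hlen', ?_, by rw [houter]; exact hnd', ?_⟩, hptr'⟩
    · intro j
      rw [hptr' j]
      split_ifs with hh
      · have hlt : st.2.getD j 0 < (seqE.getD j []).length := pv_lt_of_drop_head hh
        omega
      · exact hbnd j
    · intro v j
      rw [houter, hchar' v j]
      simp only [List.not_mem_nil, not_false_iff, true_and]
      by_cases hh : (pvRem seqE st.2 j).head? = some t
      · have hp : (js.foldl (pvInner seqE) (st.1.erase t, st.2)).2.getD j 0
            = st.2.getD j 0 + 1 := by
          simpa [hh] using hptr j
        have hrem' : pvRem seqE (js.foldl (pvInner seqE) (st.1.erase t, st.2)).2 j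
            = (seqE.getD j []).drop (st.2.getD j 0 + 1) := by
          unfold pvRem
          rw [hp]
        rw [hrem']
        constructor
        · rintro (⟨_, hd⟩ | ⟨hv, hne⟩)
          · exact hd
          · rw [hv] at hh
            exact absurd (Option.some.inj hh) hne
        · intro hd
          exact Or.inl ⟨hh, hd⟩
      · have hp : (js.foldl (pvInner seqE) (st.1.erase t, st.2)).2.getD j 0
            = st.2.getD j 0 := by
          simpa [hh] using hptr j
        have hrem' : pvRem seqE (js.foldl (pvInner seqE) (st.1.erase t, st.2)).2 j
            = pvRem seqE st.2 j := by
          unfold pvRem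
          rw [hp]
        rw [hrem']
        constructor
        · rintro (⟨hht, _⟩ | ⟨hv, _⟩)
          · exact absurd hht hh
          · exact hv
        · intro hd
          refine Or.inr ⟨hd, ?_⟩
          intro hvt
          subst hvt
          exact hh hd

-- pointer formula ⇒ suffix steps by pvStep
theorem pv_rem_step (seqE : List (List Int)) (ptrs ptrs' : List Nat) (t : Int)
    (h : ∀ j, ptrs'.getD j 0 =
      if (pvRem seqE ptrs j).head? = some t then ptrs.getD j 0 + 1 else ptrs.getD j 0) :
    ∀ j, pvRem seqE ptrs' j = pvStep t (pvRem seqE ptrs j) := by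
  intro j
  have hj := h j
  unfold pvRem at hj ⊢
  cases hrem : (seqE.getD j []).drop (ptrs.getD j 0) with
  | nil =>
    rw [hrem, if_neg (by simp)] at hj
    rw [hj, hrem]
    rfl
  | cons c cs =>
    rw [hrem] at hj
    by_cases hc : c = t
    · rw [if_pos (by simp [hc])] at hj
      rw [hj, ← List.tail_drop, hrem]
      simp [pvStep, hc]
    · rw [if_neg (by simp [hc])] at hj
      rw [hj, hrem]
      simp [pvStep, hc]

-- folding the whole trajectory
theorem pv_traj_fold (seqE : List (List Int)) : ∀ (traj : List Int)
    (st : PySem.Dict Int (List Nat) × List Nat), pvInv seqE st →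
    pvInv seqE (traj.foldl (pvOuter seqE) st) ∧
    ∀ j, pvRem seqE (traj.foldl (pvOuter seqE) st).2 j
        = traj.foldl (fun r t => pvStep t r) (pvRem seqE st.2 j) := by
  intro traj
  induction traj with
  | nil => intro st h; exact ⟨h, fun j => rfl⟩
  | cons t ts ih =>
    intro st h
    have ho := pv_outer_step seqE st t h
    have ih' := ih (pvOuter seqE st t) ho.1
    refine ⟨by simpa using ih'.1, ?_⟩
    intro j
    have hs := pv_rem_step seqE st.2 (pvOuter seqE st t).2 t ho.2 j
    simp only [List.foldl_cons]
    rw [ih'.2 j, hs]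

theorem pv_getD_replicate (n j : Nat) : (List.replicate n (0 : Nat)).getD j 0 = 0 := by
  rw [List.getD_eq_getElem?_getD, List.getElem?_replicate]
  split <;> rfl

-- the registration fold, cut off after the first k queries
def pvInitW (seqE : List (List Int)) (k : Nat) : PySem.Dict Int (List Nat) :=
  (List.range k).foldl
    (fun w j =>
      match seqE.getD j [] with
      | [] => w
      | c :: _ => pvReg w c j)
    PySem.Dict.empty

theorem pv_init_fold (seqE : List (List Int)) : ∀ (k : Nat),
    (∀ v, ((pvInitW seqE k).getD v []).Nodup) ∧
    (∀ v j, j ∈ (pvInitW seqE k).getD v [] ↔ j < k ∧ (seqE.getD j []).head? = some v) := by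
  intro k
  induction k with
  | zero =>
    constructor
    · intro v; simp [pvInitW]
    · intro v j; simp [pvInitW]
  | succ k ih =>
    have hW : pvInitW seqE (k + 1)
        = (match seqE.getD k [] with
           | [] => pvInitW seqE k
           | c :: _ => pvReg (pvInitW seqE k) c k) := by
      rw [pvInitW, List.range_succ, List.foldl_append]
      rfl
    cases hsq : seqE.getD k [] with
    | nil =>
      rw [hW, hsq]
      constructor
      · exact ih.1
      · intro v j
        rw [ih.2 v j]
        constructor
        · rintro ⟨hj, hh⟩; exact ⟨Nat.lt_succ_of_lt hj, hh⟩
        · rintro ⟨hj, hh⟩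
          refine ⟨?_, hh⟩
          rcases Nat.lt_succ_iff_lt_or_eq.mp hj with h | h
          · exact h
          · subst h; rw [hsq] at hh; simp at hh
    | cons c rest =>
      rw [hW, hsq]
      constructor
      · intro v
        rw [pv_getD_reg]
        split_ifs with hv
        · have hk : k ∉ (pvInitW seqE k).getD c [] := by
            intro hmem
            exact absurd ((ih.2 c k).mp hmem).1 (Nat.lt_irrefl k)
          simp [List.nodup_append, ih.1 c]
          exact fun a ha hak => hk (hak ▸ ha)
        · exact ih.1 v
      · intro v j
        rw [pv_getD_reg]
        split_ifs with hv
        · subst hv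
          rw [List.mem_append, ih.2 v j]
          constructor
          · rintro (⟨hj, hh⟩ | hj)
            · exact ⟨Nat.lt_succ_of_lt hj, hh⟩
            · simp at hj
              subst hj
              exact ⟨Nat.lt_succ_self _, by rw [hsq]; rfl⟩
          · rintro ⟨hj, hh⟩
            rcases Nat.lt_succ_iff_lt_or_eq.mp hj with h | h
            · exact Or.inl ⟨h, hh⟩
            · exact Or.inr (by simp [h])
        · rw [ih.2 v j]
          constructor
          · rintro ⟨hj, hh⟩; exact ⟨Nat.lt_succ_of_lt hj, hh⟩
          · rintro ⟨hj, hh⟩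
            refine ⟨?_, hh⟩
            rcases Nat.lt_succ_iff_lt_or_eq.mp hj with h | h
            · exact h
            · subst h
              rw [hsq] at hh
              simp at hh
              exact absurd hh.symm hv

-- the initial registration fold satisfies the invariant
theorem pv_init_inv (seqE : List (List Int)) :
    pvInv seqE
      ((List.range seqE.length).foldl
        (fun w j =>
          match seqE.getD j [] with
          | [] => w
          | c :: _ => pvReg w c j)
        PySem.Dict.empty,
       List.replicate seqE.length 0) := by
  have hfold := pv_init_fold seqE seqE.length
  refine ⟨by simp, ?_, hfold.1, ?_⟩
  · intro j
    rw [pv_getD_replicate]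
    exact Nat.zero_le _
  · intro v j
    rw [show ((List.range seqE.length).foldl
        (fun w j =>
          match seqE.getD j [] with
          | [] => w
          | c :: _ => pvReg w c j)
        PySem.Dict.empty) = pvInitW seqE seqE.length from rfl]
    rw [hfold.2 v j]
    unfold pvRem
    rw [pv_getD_replicate, List.drop_zero]
    constructor
    · rintro ⟨_, hh⟩; exact hh
    · intro hh
      refine ⟨pv_lt_of_getD_ne seqE j ?_, hh⟩
      intro hnil
      rw [hnil] at hh
      simp at hh

-- ===== VERDICT (by name: the statement is the Claim_ definition above) =====
theorem pv_isEmpty_drop (l : List Int) (p : Nat) (hb : p ≤ l.length) :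
    (l.drop p).isEmpty = (p == l.length) := by
  by_cases he : p = l.length
  · rw [he, List.drop_length]
    simp
  · have hf : (p == l.length) = false := by simp [he]
    rw [hf]
    simp only [List.isEmpty_eq_false_iff, ne_eq, List.drop_eq_nil_iff]
    omega

theorem relatedfeatures_spec : Claim_equal_relatedfeatures := by
  intro traj seqE _
  unfold Spec_relatedfeatures relatedfeatures relatedfeatures_alt
  dsimp only
  rw [pv_A_fold, pv_ids_range traj seqE 2001, List.nil_append]
  obtain ⟨hfin_inv, hfin_rem⟩ := pv_traj_fold seqE traj _ (pv_init_inv seqE)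
  congr 1
  apply List.filter_congr
  intro j _
  have h1 := hfin_rem j
  have h2 : pvRem seqE (List.replicate seqE.length 0) j = seqE.getD j [] := by
    unfold pvRem
    rw [pv_getD_replicate, List.drop_zero]
  rw [h2] at h1
  have h3 := pv_stream_eq_subseq traj (seqE.getD j [])
  rw [← h1] at h3
  rw [← h3]
  have hb := hfin_inv.2.1 j
  unfold pvRem
  exact pv_isEmpty_drop _ _ hb
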